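-- pv_equiv track=rewrite | github.com/981377660LMT/algorithm-study | 12_贪心算法/3119.修坑的最大数量.py | maxPotholes
-- ===== SOURCE A (Python) =====
-- from itertools import groupby
-- from typing import Counter
--
-- def maxPotholes(road: str, budget: int) -> int:
--     groups = [(char, len(list(group))) for char, group in groupby(road)]
--     onesCounter = Counter(v for k, v in groups if k == "x")
--     res, remain = 0, budget
--     for len_, count in sorted(onesCounter.items(), reverse=True):
--         cost = len_ + 1
--         # 这个长度可以全部修完
--         if cost * count <= remain:
--             res += count * len_
--             remain -= cost * count
--         else:
--             div = remain // cost
--             res += div * len_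
--             remain = remain - cost * div
--             if remain >= 1:
--                 res += remain - 1
--             break
--
--     return res
-- ===== SOURCE B (Python) =====
-- def maxPotholes(road: str, budget: int) -> int:
--     runs = []
--     cur = 0
--     for ch in road:
--         if ch == 'x':
--             cur += 1
--         else:
--             if cur > 0:
--                 runs.append(cur)
--             cur = 0
--     if cur > 0:
--         runs.append(cur)
--     runs.sort(reverse=True)
--     # pref[i] = cost (potholes + one extra unit each) of fully filling the i largest runs
--     pref = [0]
--     for length in runs:
--         pref.append(pref[-1] + length + 1)
--     # binary search the largest k with pref[k] <= budget
--     lo, hi = 0, len(runs)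
--     while lo < hi:
--         mid = (lo + hi + 1) // 2
--         if pref[mid] <= budget:
--             lo = mid
--         else:
--             hi = mid - 1
--     k = lo
--     res = pref[k] - k
--     remain = budget - pref[k]
--     if k < len(runs) and remain >= 1:
--         res += remain - 1
--     return res
-- ===== Notes on version B (the rewrite author's own statement) =====
-- stated objective: alternative
-- what changed: B drops A's Counter buckets and greedy count/div loop entirely: it collects run lengths by a manual character scan, sorts them descending, builds a prefix-sum array of fill costs, binary-searches the largest number k of fully affordable runs, and computes the answer in closed form from pref[k] plus one partial fill.
-- outside the precondition, e.g. on maxPotholes('x', -1): A returns -1, B returns 0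
import Mathlib
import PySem

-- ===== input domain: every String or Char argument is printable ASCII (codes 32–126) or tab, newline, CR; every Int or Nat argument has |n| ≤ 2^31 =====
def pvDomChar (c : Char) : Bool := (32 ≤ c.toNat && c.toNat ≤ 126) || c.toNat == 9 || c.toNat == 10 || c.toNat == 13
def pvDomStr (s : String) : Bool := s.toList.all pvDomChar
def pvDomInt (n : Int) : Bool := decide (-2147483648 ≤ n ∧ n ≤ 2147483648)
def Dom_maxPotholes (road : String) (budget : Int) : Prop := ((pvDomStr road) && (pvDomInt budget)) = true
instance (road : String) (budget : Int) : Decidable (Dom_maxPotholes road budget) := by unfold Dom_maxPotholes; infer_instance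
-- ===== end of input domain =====

-- B replaces A's Counter-bucket greedy (count multiplication and // partial fill) by a
-- prefix-sum array over the descending run lengths, a binary search for the number of fully
-- affordable runs, and a closed-form answer (objective: alternative).

-- ===== PORT A =====
-- itertools.groupby as run-length encoding (char, length of the group)
def pvRle : List Char → List (Char × Int)
  | [] => []
  | c :: cs =>
      (c, 1 + ((cs.takeWhile (· == c)).length : Int)) :: pvRle (cs.dropWhile (· == c))
  termination_by l => l.length
  decreasing_by exact Nat.lt_succ_of_le (List.length_dropWhile_le _ _)

-- A's for-loop over the sorted Counter items, with its break
def pvLoopA : List (Int × Int) → Int → Int → Int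
  | [], res, _ => res
  | (len_, count) :: rest, res, remain =>
      let cost := len_ + 1
      if cost * count ≤ remain then
        pvLoopA rest (res + count * len_) (remain - cost * count)
      else
        let dv := PySem.Int.floordiv remain cost
        let res' := res + dv * len_
        let remain' := remain - cost * dv
        if 1 ≤ remain' then res' + (remain' - 1) else res'

def maxPotholes (road : String) (budget : Int) : Int :=
  let groups := pvRle road.toList
  let xs := (groups.filter (fun p => p.1 == 'x')).map (·.2)
  let onesCounter := PySem.Dict.counter xs
  pvLoopA (PySem.List.sorted2 onesCounter.items (·.1) (·.2) true) 0 budget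

-- ===== PORT B =====
-- B's character scan collecting the lengths of maximal 'x' runs
def pvScan : List Char → List Int → Int → List Int
  | [], runs, cur => if 0 < cur then runs ++ [cur] else runs
  | c :: cs, runs, cur =>
      if c == 'x' then pvScan cs runs (cur + 1)
      else if 0 < cur then pvScan cs (runs ++ [cur]) 0 else pvScan cs runs 0

-- B's while-loop binary search for the largest k with pref[k] <= budget
def pvBis (pref : List Int) (budget : Int) (lo hi : Int) : Int :=
  if h : lo < hi then
    if (PySem.List.pyGet? pref (PySem.Int.floordiv (lo + hi + 1) 2)).getD 0 ≤ budget then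
      pvBis pref budget (PySem.Int.floordiv (lo + hi + 1) 2) hi
    else
      pvBis pref budget lo (PySem.Int.floordiv (lo + hi + 1) 2 - 1)
  else lo
  termination_by (hi - lo).toNat
  decreasing_by
  · have := PySem.Int.floordiv_eq_ediv_of_pos (a := lo + hi + 1) (b := 2) (by omega)
    omega
  · have := PySem.Int.floordiv_eq_ediv_of_pos (a := lo + hi + 1) (b := 2) (by omega)
    omega

def maxPotholes_alt (road : String) (budget : Int) : Int :=
  let runs := PySem.List.sorted (pvScan road.toList [] 0) (fun x => x) true
  let pref := runs.foldl (fun p length => p ++ [(PySem.List.pyGet? p (-1)).getD 0 + length + 1]) [0]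
  let k := pvBis pref budget 0 (runs.length : Int)
  let pk := (PySem.List.pyGet? pref k).getD 0
  let res := pk - k
  let remain := budget - pk
  if k < (runs.length : Int) ∧ 1 ≤ remain then res + (remain - 1) else res

-- ===== PRECONDITION & SPEC =====
-- Pre_ restricts to the natural domain of nonnegative budgets: on a negative budget A's
-- floor division yields a meaningless negative pothole count (e.g. -1 on ("x", -1)) while B returns 0.
def Pre_maxPotholes (road : String) (budget : Int) : Prop := 0 ≤ budget
instance (road : String) (budget : Int) : Decidable (Pre_maxPotholes road budget) := by
  unfold Pre_maxPotholes; infer_instance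

def pvWitness_maxPotholes : String × Int := ("xx.x..xxx", 5)

def Spec_maxPotholes (road : String) (budget : Int) (out : Int) : Prop := out = maxPotholes_alt road budget
instance (road : String) (budget : Int) (out : Int) : Decidable (Spec_maxPotholes road budget out) := by unfold Spec_maxPotholes; infer_instance

-- ===== CLAIM (what is proved, stated in full; the proofs are below) =====
def Claim_equal_maxPotholes : Prop := ∀ (road : String) (budget : Int), Dom_maxPotholes road budget → Pre_maxPotholes road budget → Spec_maxPotholes road budget (maxPotholes road budget)

-- ===== LEMMAS AND PROOFS =====

-- the flat per-run greedy, used only as the intermediate semantics both ports are reduced to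
def pvLoopB : List Int → Int → Int → Int
  | [], res, _ => res
  | l :: rest, res, remain =>
      if l + 1 ≤ remain then pvLoopB rest (res + l) (remain - (l + 1))
      else if 1 ≤ remain then res + (remain - 1) else res

-- the x-run lengths of a character list, as A computes them
def pvXruns (l : List Char) : List Int :=
  ((pvRle l).filter (fun p => p.1 == 'x')).map (·.2)

theorem pvRle_pos (l : List Char) : ∀ p ∈ pvRle l, 1 ≤ p.2 := by
  induction l using pvRle.induct with
  | case1 => intro p hp; simp [pvRle] at hp
  | case2 c cs ih =>
    intro p hp
    rw [pvRle] at hp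
    rcases List.mem_cons.1 hp with h | h
    · subst h; simp only []; omega
    · exact ih p h

theorem pvXruns_pos (l : List Char) : ∀ v ∈ pvXruns l, 1 ≤ v := by
  intro v hv
  rcases List.mem_map.1 hv with ⟨p, hp, hpv⟩
  exact hpv ▸ pvRle_pos l p (List.mem_of_mem_filter hp)

theorem pvScan_x (cs : List Char) : ∀ (runs : List Int) (cur : Int), 1 ≤ cur →
    pvScan cs runs cur =
      pvScan (cs.dropWhile (· == 'x'))
        (runs ++ [cur + (((cs.takeWhile (· == 'x')).length : Int))]) 0 := by
  induction cs with
  | nil => intro runs cur h; simp [pvScan, show (0:Int) < cur by omega]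
  | cons c cs ih =>
    intro runs cur h
    by_cases hc : c = 'x'
    · subst hc
      rw [pvScan]
      simp only [BEq.rfl, if_true]
      rw [List.takeWhile_cons_of_pos (by simp), List.dropWhile_cons_of_pos (by simp)]
      rw [ih runs (cur + 1) (by omega)]
      congr 3
      simp only [List.length_cons]
      push_cast
      ring
    · rw [pvScan]
      have hb : (c == 'x') = false := by simp [hc]
      rw [List.takeWhile_cons_of_neg (by simp [hc]), List.dropWhile_cons_of_neg (by simp [hc])]
      simp only [hb, if_false, Bool.false_eq_true, show (0:Int) < cur by omega, if_true]
      rw [pvScan]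
      simp [hb]

theorem pvScan_skip (pre : List Char) : ∀ (cs : List Char) (runs : List Int), (∀ d ∈ pre, d ≠ 'x') →
    pvScan (pre ++ cs) runs 0 = pvScan cs runs 0 := by
  induction pre with
  | nil => intro cs runs _; rfl
  | cons d pre ih =>
    intro cs runs h
    rw [List.cons_append, pvScan]
    have hb : (d == 'x') = false := by simp [h d (List.mem_cons_self ..)]
    simp only [hb, Bool.false_eq_true, if_false, lt_irrefl]
    exact ih cs runs (fun e he => h e (List.mem_cons_of_mem _ he))

theorem pvScan_eq (l : List Char) : ∀ runs, pvScan l runs 0 = runs ++ pvXruns l := by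
  induction l using pvRle.induct with
  | case1 => intro runs; simp [pvScan, pvXruns, pvRle]
  | case2 c cs ih =>
    intro runs
    by_cases hc : c = 'x'
    · subst hc
      rw [pvScan]
      simp only [BEq.rfl, if_true]
      rw [show (0:Int) + 1 = 1 from rfl, pvScan_x cs runs 1 le_rfl, ih]
      unfold pvXruns
      rw [pvRle]
      simp [List.append_assoc]
    · rw [pvScan]
      have hb : (c == 'x') = false := by simp [hc]
      simp only [hb, Bool.false_eq_true, if_false, lt_irrefl]
      conv_lhs => rw [← List.takeWhile_append_dropWhile (p := (· == c)) (l := cs)]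
      rw [pvScan_skip _ _ _ (fun d hd => by
        have := List.mem_takeWhile_imp hd
        simp at this; simp [this, hc]), ih]
      unfold pvXruns
      rw [pvRle]
      simp [hb]

theorem pvInsertBy_congr {α : Type} (f g : α → α → Bool) (x : α) (acc : List α)
    (h : ∀ y ∈ acc, f x y = g x y) :
    PySem.List.insertBy f x acc = PySem.List.insertBy g x acc := by
  induction acc with
  | nil => rfl
  | cons y ys ih =>
    rw [PySem.List.insertBy, PySem.List.insertBy, h y (List.mem_cons_self ..)]
    split
    · rfl
    · rw [ih (fun z hz => h z (List.mem_cons_of_mem _ hz))]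

theorem pvFoldl_insertBy_congr {α : Type} (f g : α → α → Bool) (P : α → Prop)
    (hfg : ∀ a b, P a → P b → f a b = g a b) :
    ∀ (xs acc : List α), (∀ a ∈ xs, P a) → (∀ b ∈ acc, P b) →
      xs.foldl (fun acc x => PySem.List.insertBy f x acc) acc
        = xs.foldl (fun acc x => PySem.List.insertBy g x acc) acc := by
  intro xs
  induction xs with
  | nil => intro acc _ _; rfl
  | cons x xs ih =>
    intro acc hxs hacc
    rw [List.foldl_cons, List.foldl_cons]
    rw [pvInsertBy_congr f g x acc
      (fun y hy => hfg x y (hxs x (List.mem_cons_self ..)) (hacc y hy))]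
    exact ih _ (fun a ha => hxs a (List.mem_cons_of_mem _ ha))
      (fun b hb => by
        rcases (PySem.List.mem_insertBy ..).1 hb with h | h
        · exact h ▸ hxs x (List.mem_cons_self ..)
        · exact hacc b h)

theorem pvCount_flatMap_replicate (D : List Int) (cnt : Int → Nat) (hnd : D.Nodup) (a : Int) :
    (D.flatMap fun k => List.replicate (cnt k) k).count a = if a ∈ D then cnt a else 0 := by
  induction D with
  | nil => simp
  | cons k D ih =>
    rcases List.nodup_cons.1 hnd with ⟨hk, hnd'⟩
    rw [List.flatMap_cons, List.count_append, ih hnd']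
    by_cases hak : a = k
    · subst hak
      simp [hk]
    · rw [List.count_replicate]
      simp [hak, List.mem_cons, Ne.symm hak]

theorem pvPairwise_ge_flatMap (D : List Int) (cnt : Int → Nat)
    (h : D.Pairwise (fun a b => b < a)) :
    (D.flatMap fun k => List.replicate (cnt k) k).Pairwise (fun a b => b ≤ a) := by
  induction D with
  | nil => simp
  | cons k D ih =>
    rcases List.pairwise_cons.1 h with ⟨hk, h'⟩
    rw [List.flatMap_cons]
    rw [List.pairwise_append]
    refine ⟨List.pairwise_replicate.2 (Or.inr (le_refl k)), ih h', ?_⟩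
    · intro a ha b hb
      rcases List.mem_flatMap.1 hb with ⟨k', hk', hb'⟩
      have := List.eq_of_mem_replicate ha
      have := List.eq_of_mem_replicate hb'
      subst a; subst b
      exact le_of_lt (hk k' hk')

theorem pvLoopB_rep (k : Int) (hk : 1 ≤ k) :
    ∀ (c : Nat) (rest : List Int) (res remain : Int), 0 ≤ remain →
      pvLoopB (List.replicate c k ++ rest) res remain =
        if (k + 1) * (c : Int) ≤ remain then
          pvLoopB rest (res + (c : Int) * k) (remain - (k + 1) * (c : Int))
        else
          res + (remain / (k + 1)) * k +
            (if 1 ≤ remain % (k + 1) then remain % (k + 1) - 1 else 0) := by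
  intro c
  induction c with
  | zero => intro rest res remain h; simp [h]
  | succ c ih =>
    intro rest res remain h
    rw [List.replicate_succ, List.cons_append, pvLoopB]
    by_cases hle : k + 1 ≤ remain
    · rw [if_pos hle, ih rest (res + k) (remain - (k + 1)) (by omega)]
      have hc1 : ((k + 1) * ((c : Int) + 1) ≤ remain) ↔ ((k + 1) * (c : Int) ≤ remain - (k + 1)) := by
        constructor <;> intro <;> nlinarith
      have hdiv : (remain - (k + 1)) / (k + 1) = remain / (k + 1) - 1 := by
        have := Int.add_mul_ediv_right remain (-1) (show (k:Int) + 1 ≠ 0 by omega)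
        rw [show remain + -1 * (k + 1) = remain - (k + 1) by ring] at this
        omega
      have hmod : (remain - (k + 1)) % (k + 1) = remain % (k + 1) := by
        rw [Int.sub_emod, Int.emod_self, sub_zero, Int.emod_emod_of_dvd _ (dvd_refl _)]
      push_cast
      by_cases h2 : (k + 1) * ((c : Int) + 1) ≤ remain
      · rw [if_pos h2, if_pos (hc1.1 h2)]
        congr 1 <;> ring
      · rw [if_neg h2, if_neg (fun hx => h2 (hc1.2 hx)), hdiv, hmod]
        ring_nf
    · rw [if_neg hle]
      have hc : ¬ ((k + 1) * ((c : Nat) + 1 : Int) ≤ remain) := by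
        intro hx
        nlinarith [Int.natCast_nonneg c]
      have hdiv0 : remain / (k + 1) = 0 := Int.ediv_eq_zero_of_lt h (by omega)
      have hmod0 : remain % (k + 1) = remain := Int.emod_eq_of_lt h (by omega)
      push_cast
      push_cast at hc
      rw [if_neg hc, hdiv0, hmod0]
      split <;> ring

theorem pvLoopA_eq_loopB (cnt : Int → Nat) :
    ∀ (D : List Int) (res remain : Int), 0 ≤ remain →
      (∀ k ∈ D, 1 ≤ k ∧ 1 ≤ cnt k) →
      pvLoopA (D.map fun k => (k, (cnt k : Int))) res remain
        = pvLoopB (D.flatMap fun k => List.replicate (cnt k) k) res remain := by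
  intro D
  induction D with
  | nil => intro res remain _ _; rfl
  | cons k D ih =>
    intro res remain h hks
    obtain ⟨hk1, hc1⟩ := hks k (List.mem_cons_self ..)
    rw [List.map_cons, List.flatMap_cons, pvLoopA,
        pvLoopB_rep k hk1 (cnt k) _ res remain h]
    simp only []
    by_cases hle : (k + 1) * (cnt k : Int) ≤ remain
    · rw [if_pos hle, if_pos hle]
      rw [ih _ _ (by omega) (fun k' hk' => hks k' (List.mem_cons_of_mem _ hk'))]
    · rw [if_neg hle, if_neg hle]
      rw [PySem.Int.floordiv_eq_ediv_of_pos (by omega)]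
      have hrw : remain - (k + 1) * (remain / (k + 1)) = remain % (k + 1) := by
        rw [Int.emod_def]
      rw [hrw]
      split <;> ring

-- A's result equals the flat greedy over the descending run lengths
theorem pvCore (runs : List Int) (budget : Int) (hpos : ∀ v ∈ runs, 1 ≤ v) (hb : 0 ≤ budget) :
    pvLoopA (PySem.List.sorted2 (PySem.Dict.counter runs).items (·.1) (·.2) true) 0 budget
      = pvLoopB (PySem.List.sorted runs (fun x => x) true) 0 budget := by
  have hitems := PySem.Dict.items_counter (κ := Int) runs
  set f : Int → (Int × Int) := fun k => (k, (List.count k runs : Int)) with hf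
  set S : List Int := PySem.Set.ofList runs with hS
  set D : List Int := PySem.List.sorted S (fun x => x) true with hD
  have hD_perm : D.Perm S := PySem.List.sorted_perm ..
  have hS_nodup : S.Nodup := PySem.Set.nodup_ofList ..
  have hD_nodup : D.Nodup := (hD_perm.nodup_iff).2 hS_nodup
  have hD_le : D.Pairwise (fun a b => b ≤ a) := PySem.List.sorted_pairwise_rev ..
  have hD_lt : D.Pairwise (fun a b => b < a) :=
    (hD_le.and hD_nodup).imp (fun h => lt_of_le_of_ne h.1 (Ne.symm h.2))
  have hmemD : ∀ a, a ∈ D ↔ a ∈ runs := by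
    intro a
    rw [List.Perm.mem_iff hD_perm, hS, PySem.Set.mem_ofList]
  have hinj : ∀ a ∈ S.map f, ∀ b ∈ S.map f, a.1 = b.1 → a = b := by
    intro a ha b hb h1
    rcases List.mem_map.1 ha with ⟨k, _, rfl⟩
    rcases List.mem_map.1 hb with ⟨k', _, rfl⟩
    simp only [hf] at h1 ⊢
    rw [h1]
  have e1a : PySem.List.sorted2 (PySem.Dict.counter runs).items (·.1) (·.2) true
      = PySem.List.sorted (PySem.Dict.counter runs).items (·.1) true := by
    rw [hitems]
    show (S.map f).foldl (fun acc x => PySem.List.insertBy _ x acc) []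
      = (S.map f).foldl (fun acc x => PySem.List.insertBy _ x acc) []
    apply pvFoldl_insertBy_congr _ _ (fun p => p ∈ S.map f)
    · intro a b ha hb
      rcases lt_trichotomy a.1 b.1 with h | h | h
      · simp [h, lt_asymm h]
      · have : a = b := hinj a ha b hb h
        subst this
        simp
      · simp [h, lt_asymm h]
    · exact fun a ha => ha
    · intro b hb; cases hb
  have e1b : PySem.List.sorted (PySem.Dict.counter runs).items (·.1) true = D.map f := by
    apply PySem.List.sorted_rev_eq_of_perm_of_pairwise_gt
    · rw [hitems]
      exact hD_perm.map f
    · exact List.pairwise_map.2 hD_lt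
  have e2 : PySem.List.sorted runs (fun x => x) true
      = D.flatMap (fun k => List.replicate (List.count k runs) k) := by
    apply PySem.List.eq_of_perm_of_pairwise_le_of_injective (fun x : Int => -x) neg_injective
    · refine (PySem.List.sorted_perm ..).trans (List.perm_iff_count.2 (fun a => ?_))
      rw [pvCount_flatMap_replicate D _ hD_nodup a]
      by_cases ha : a ∈ runs
      · rw [if_pos ((hmemD a).2 ha)]
      · rw [if_neg (fun h => ha ((hmemD a).1 h)), List.count_eq_zero.2 ha]
    · exact (PySem.List.sorted_pairwise_rev ..).imp (fun h => neg_le_neg h)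
    · exact (pvPairwise_ge_flatMap D _ hD_lt).imp (fun h => neg_le_neg h)
  rw [e1a, e1b, e2]
  exact pvLoopA_eq_loopB _ D 0 budget hb (fun k hk =>
    ⟨hpos k ((hmemD k).1 hk), List.count_pos_iff.2 ((hmemD k).1 hk)⟩)

-- ---- B side: prefix costs, the binary search, and the closed form ----

-- cost of fully filling the first j runs
def pvCost : List Int → Nat → Int
  | _, 0 => 0
  | [], _ + 1 => 0
  | l :: rest, j + 1 => l + 1 + pvCost rest j

-- the tail of the prefix array built from running total c
def pvPrefList : List Int → Int → List Int
  | [], _ => []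
  | l :: rest, c => (c + l + 1) :: pvPrefList rest (c + l + 1)

theorem pvFold_pref : ∀ (runs acc : List Int) (c : Int),
    PySem.List.pyGet? acc (-1) = some c →
    runs.foldl (fun p length => p ++ [(PySem.List.pyGet? p (-1)).getD 0 + length + 1]) acc
      = acc ++ pvPrefList runs c := by
  intro runs
  induction runs with
  | nil => intro acc c _; simp [pvPrefList]
  | cons l rest ih =>
    intro acc c h
    rw [List.foldl_cons]
    simp only [h, Option.getD_some]
    rw [ih (acc ++ [c + l + 1]) (c + l + 1)
        (PySem.List.pyGet?_neg_one_append_singleton ..), pvPrefList]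
    simp [List.append_assoc]

theorem pvPrefList_get : ∀ (runs : List Int) (c : Int) (j : Nat), j < runs.length →
    (pvPrefList runs c)[j]? = some (c + pvCost runs (j + 1)) := by
  intro runs
  induction runs with
  | nil => intro c j h; simp at h
  | cons l rest ih =>
    intro c j h
    cases j with
    | zero => simp [pvPrefList, pvCost]; ring
    | succ j =>
      rw [pvPrefList]
      simp only [List.getElem?_cons_succ]
      rw [ih _ j (by simpa using h)]
      congr 1
      show c + l + 1 + pvCost rest (j + 1) = c + (l + 1 + pvCost rest (j + 1))
      ring

theorem pvPref_get (runs : List Int) (i : Int) (h0 : 0 ≤ i) (hn : i ≤ (runs.length : Int)) :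
    (PySem.List.pyGet? (0 :: pvPrefList runs 0) i).getD 0 = pvCost runs i.toNat := by
  rw [PySem.List.pyGet?_of_nonneg _ h0]
  cases hk : i.toNat with
  | zero => simp [pvCost]
  | succ j =>
    simp only [List.getElem?_cons_succ]
    rw [pvPrefList_get runs 0 j (by omega)]
    simp

theorem pvCost_nonneg : ∀ (runs : List Int), (∀ l ∈ runs, 1 ≤ l) → ∀ j, 0 ≤ pvCost runs j := by
  intro runs
  induction runs with
  | nil => intro _ j; cases j <;> simp [pvCost]
  | cons l rest ih =>
    intro h j
    cases j with
    | zero => simp [pvCost]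
    | succ j =>
      have h1 : 1 ≤ l := h l (List.mem_cons_self ..)
      have := ih (fun x hx => h x (List.mem_cons_of_mem _ hx)) j
      rw [pvCost]
      omega

theorem pvCost_step : ∀ (runs : List Int), (∀ l ∈ runs, 1 ≤ l) →
    ∀ j, pvCost runs j ≤ pvCost runs (j + 1) := by
  intro runs
  induction runs with
  | nil => intro _ j; cases j <;> simp [pvCost]
  | cons l rest ih =>
    intro h j
    cases j with
    | zero =>
      have h1 : 1 ≤ l := h l (List.mem_cons_self ..)
      have := pvCost_nonneg rest (fun x hx => h x (List.mem_cons_of_mem _ hx)) 0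
      rw [pvCost, pvCost]
      omega
    | succ j =>
      have := ih (fun x hx => h x (List.mem_cons_of_mem _ hx)) j
      rw [pvCost, pvCost]
      omega

theorem pvCost_mono (runs : List Int) (hpos : ∀ l ∈ runs, 1 ≤ l) {i j : Nat} (h : i ≤ j) :
    pvCost runs i ≤ pvCost runs j := by
  induction j, h using Nat.le_induction with
  | base => exact le_rfl
  | succ j hij ih => exact le_trans ih (pvCost_step runs hpos j)

theorem pvBis_spec (runs : List Int) (hpos : ∀ l ∈ runs, 1 ≤ l) (budget : Int) :
    ∀ (fuel : Nat) (lo hi : Int), (hi - lo).toNat ≤ fuel → 0 ≤ lo → lo ≤ hi → hi ≤ (runs.length : Int) →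
      pvCost runs lo.toNat ≤ budget →
      (∀ j : Int, hi < j → j ≤ (runs.length : Int) → budget < pvCost runs j.toNat) →
      0 ≤ pvBis (0 :: pvPrefList runs 0) budget lo hi ∧
      pvBis (0 :: pvPrefList runs 0) budget lo hi ≤ (runs.length : Int) ∧
      pvCost runs (pvBis (0 :: pvPrefList runs 0) budget lo hi).toNat ≤ budget ∧
      (∀ j : Int, pvBis (0 :: pvPrefList runs 0) budget lo hi < j → j ≤ (runs.length : Int) →
        budget < pvCost runs j.toNat) := by
  intro fuel
  induction fuel with
  | zero =>
    intro lo hi hfuel h0 hlh hhn hlo hhi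
    have heq : lo = hi := by omega
    rw [pvBis, dif_neg (by omega)]
    exact ⟨h0, by omega, hlo, fun j hj hjn => hhi j (by omega) hjn⟩
  | succ f ih =>
    intro lo hi hfuel h0 hlh hhn hlo hhi
    rw [pvBis]
    by_cases hlt : lo < hi
    · rw [dif_pos hlt]
      have hd : PySem.Int.floordiv (lo + hi + 1) 2 = (lo + hi + 1) / 2 :=
        PySem.Int.floordiv_eq_ediv_of_pos (by omega)
      set mid := PySem.Int.floordiv (lo + hi + 1) 2 with hmid
      have hm1 : lo < mid := by rw [hd]; omega
      have hm2 : mid ≤ hi := by rw [hd]; omega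
      rw [pvPref_get runs mid (by omega) (by omega)]
      by_cases hc : pvCost runs mid.toNat ≤ budget
      · rw [if_pos hc]
        exact ih mid hi (by omega) (by omega) hm2 hhn hc hhi
      · rw [if_neg hc]
        refine ih lo (mid - 1) (by omega) h0 (by omega) (by omega) hlo ?_
        intro j hj hjn
        exact lt_of_lt_of_le (lt_of_not_ge hc) (pvCost_mono runs hpos (by omega))
    · rw [dif_neg hlt]
      have heq : lo = hi := by omega
      exact ⟨h0, by omega, hlo, fun j hj hjn => hhi j (by omega) hjn⟩

theorem pvLoopB_formula : ∀ (runs : List Int) (res budget : Int) (k : Nat),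
    0 ≤ budget → (∀ l ∈ runs, 1 ≤ l) → k ≤ runs.length →
    pvCost runs k ≤ budget → (k < runs.length → budget < pvCost runs (k + 1)) →
    pvLoopB runs res budget = res + (pvCost runs k - k) +
      (if k < runs.length ∧ 1 ≤ budget - pvCost runs k then budget - pvCost runs k - 1 else 0) := by
  intro runs
  induction runs with
  | nil =>
    intro res budget k hb hpos hk hc hs
    have : k = 0 := by simpa using hk
    subst this
    simp [pvLoopB, pvCost]
  | cons l rest ih =>
    intro res budget k hb hpos hk hc hs
    have hl : 1 ≤ l := hpos l (List.mem_cons_self ..)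
    have hposr : ∀ x ∈ rest, 1 ≤ x := fun x hx => hpos x (List.mem_cons_of_mem _ hx)
    cases k with
    | zero =>
      have hbl : budget < l + 1 := by
        have := hs (by simp)
        rw [show pvCost (l :: rest) 1 = l + 1 + pvCost rest 0 from rfl] at this
        simp only [pvCost] at this
        omega
      rw [pvLoopB, if_neg (by omega)]
      have hlen : 0 < (l :: rest).length := by simp
      simp only [pvCost]
      by_cases h1 : 1 ≤ budget
      · rw [if_pos h1, if_pos ⟨hlen, by omega⟩]
        push_cast
        ring
      · rw [if_neg h1, if_neg (by rintro ⟨_, h⟩; omega)]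
        push_cast
        ring
    | succ k =>
      have hcost : pvCost (l :: rest) (k + 1) = l + 1 + pvCost rest k := rfl
      have hr0 : 0 ≤ pvCost rest k := pvCost_nonneg rest hposr k
      have hbl : l + 1 ≤ budget := by rw [hcost] at hc; omega
      rw [pvLoopB, if_pos hbl]
      rw [ih (res + l) (budget - (l + 1)) k (by omega) hposr (by simpa using hk)
          (by rw [hcost] at hc; omega)
          (fun h => by
            have := hs (by simpa using h)
            rw [show pvCost (l :: rest) (k + 1 + 1) = l + 1 + pvCost rest (k + 1) from rfl] at this
            omega)]
      rw [hcost]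
      have hiff : (k < rest.length ∧ 1 ≤ budget - (l + 1) - pvCost rest k) ↔
          (k + 1 < (l :: rest).length ∧ 1 ≤ budget - (l + 1 + pvCost rest k)) := by
        simp only [List.length_cons]
        omega
      rw [if_congr hiff rfl rfl]
      split_ifs <;> · push_cast; ring

-- ===== VERDICT (by name: the statement is the Claim_ definition above) =====
theorem maxPotholes_spec : Claim_equal_maxPotholes := by
  intro road budget _ hpre
  unfold Spec_maxPotholes
  have hA : maxPotholes road budget
      = pvLoopB (PySem.List.sorted (pvXruns road.toList) (fun x => x) true) 0 budget := by
    unfold maxPotholes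
    exact pvCore _ budget (fun v hv => pvXruns_pos road.toList v hv) hpre
  unfold maxPotholes_alt
  simp only []
  rw [pvScan_eq road.toList [], List.nil_append]
  set runs := PySem.List.sorted (pvXruns road.toList) (fun x => x) true with hruns
  have hpos : ∀ l ∈ runs, 1 ≤ l := fun l hl =>
    pvXruns_pos road.toList l ((PySem.List.mem_sorted ..).1 hl)
  have hfold : runs.foldl (fun p length => p ++ [(PySem.List.pyGet? p (-1)).getD 0 + length + 1]) [0]
      = 0 :: pvPrefList runs 0 := by
    rw [pvFold_pref runs [0] 0 (by simp [PySem.List.pyGet?_neg_one])]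
    rfl
  rw [hfold]
  obtain ⟨hk0, hkn, hkc, hkj⟩ := pvBis_spec runs hpos budget
    ((runs.length : Int)).toNat 0 (runs.length : Int) (by omega) le_rfl (by positivity) le_rfl
    (by simpa [pvCost] using hpre) (fun j h1 h2 => absurd (lt_of_lt_of_le h1 h2) (lt_irrefl _))
  set k := pvBis (0 :: pvPrefList runs 0) budget 0 (runs.length : Int) with hk
  rw [pvPref_get runs k hk0 hkn]
  have hki : k = (k.toNat : Int) := (Int.toNat_of_nonneg hk0).symm
  have hstep : k.toNat < runs.length → budget < pvCost runs (k.toNat + 1) := by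
    intro h
    have h1 := hkj (k + 1) (by omega) (by omega)
    have h2 : (k + 1).toNat = k.toNat + 1 := by omega
    rwa [h2] at h1
  rw [hA, pvLoopB_formula runs 0 budget k.toNat hpre hpos (by omega) hkc hstep]
  have hiff : (k < (runs.length : Int) ∧ 1 ≤ budget - pvCost runs k.toNat) ↔
      (k.toNat < runs.length ∧ 1 ≤ budget - pvCost runs k.toNat) := by
    constructor <;> rintro ⟨h1, h2⟩ <;> exact ⟨by omega, h2⟩
  rw [if_congr hiff rfl rfl]
  split_ifs <;> · rw [hki]; simp only [Int.toNat_natCast]; ring
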